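-- pv_equiv track=rewrite | github.com/Pranav4798/Python-DSA-Practice | Monotonic Stack/496_NextGreaterElement_I.py | NextGreaterElem
-- ===== SOURCE A (Python) =====
-- def NextGreaterElem(nums1, nums2):
--     stack = []
--     nge = {}
--
--     for num in nums2:
--         while stack and stack[-1] < num:
--             nge[stack.pop()] = num
--         stack.append(num)
--
--     while stack:
--         nge[stack.pop()] = -1
--
--     return[nge[num] for num in nums1]
-- ===== SOURCE B (Python) =====
-- def NextGreaterElem(nums1, nums2):
--     # Index the LAST occurrence of each value (later enumerate pairs overwrite
--     # earlier ones), then answer each query by a direct forward scan from there.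
--     last = {v: i for i, v in enumerate(nums2)}
--     return [first_greater(nums2[last[num] + 1:], num) for num in nums1]
--
--
-- def first_greater(xs, v):
--     for x in xs:
--         if x > v:
--             return x
--     return -1
-- ===== Notes on version B (the rewrite author's own statement) =====
-- stated objective: simpler
-- what changed: Replaces the monotonic-stack precomputation of all next-greater answers with a last-occurrence index dict plus a direct per-query forward scan for the first strictly greater element.
import Mathlib
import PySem

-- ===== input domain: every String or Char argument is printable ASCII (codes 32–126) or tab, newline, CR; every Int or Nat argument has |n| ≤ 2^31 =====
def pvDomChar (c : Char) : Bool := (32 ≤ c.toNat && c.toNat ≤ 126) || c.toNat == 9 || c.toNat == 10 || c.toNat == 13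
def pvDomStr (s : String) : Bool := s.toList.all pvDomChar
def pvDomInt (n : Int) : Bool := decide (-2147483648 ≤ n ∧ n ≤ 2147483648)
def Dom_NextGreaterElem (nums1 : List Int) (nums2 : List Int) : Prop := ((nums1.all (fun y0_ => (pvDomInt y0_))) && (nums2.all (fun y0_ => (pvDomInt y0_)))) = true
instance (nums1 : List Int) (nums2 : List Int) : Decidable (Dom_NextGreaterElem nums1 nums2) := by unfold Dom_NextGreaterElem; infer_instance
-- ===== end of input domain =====

-- B replaces A's monotonic-stack + dict precomputation by a direct per-query scan
-- (first strictly greater element after the last occurrence); objective: simpler.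

-- ===== PORT A =====
-- inner 'while stack and stack[-1] < num' loop (head of the list = top of the stack)
def popLoop (stack : List Int) (nge : PySem.Dict Int Int) (num : Int) : List Int × PySem.Dict Int Int :=
  match stack with
  | [] => ([], nge)
  | top :: rest =>
      if top < num then popLoop rest (nge.insert top num) num
      else (top :: rest, nge)

-- body of 'for num in nums2'
def pushStep (st : List Int × PySem.Dict Int Int) (num : Int) : List Int × PySem.Dict Int Int :=
  let p := popLoop st.1 st.2 num
  (num :: p.1, p.2)

def NextGreaterElem (nums1 : List Int) (nums2 : List Int) : List Int :=
  let st := nums2.foldl pushStep ([], PySem.Dict.empty)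
  -- 'while stack: nge[stack.pop()] = -1'
  let nge := st.1.foldl (fun d v => d.insert v (-1)) st.2
  -- 'nge[num]' raises KeyError when absent; Pre_ excludes that, default is unreachable there
  nums1.map (fun num => (nge.get? num).getD 0)

-- ===== PORT B =====
-- last = {v: i for i, v in enumerate(nums2)}
def lastOcc (nums2 : List Int) : PySem.Dict Int Int :=
  (PySem.List.enumerate nums2 0).foldl (fun d p => d.insert p.2 p.1) PySem.Dict.empty

def firstGreater (xs : List Int) (v : Int) : Int :=
  match xs with
  | [] => -1
  | x :: rest => if x > v then x else firstGreater rest v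

def NextGreaterElem_alt (nums1 : List Int) (nums2 : List Int) : List Int :=
  -- 'last[num]' raises KeyError when absent; Pre_ excludes that, default is unreachable there
  nums1.map (fun num =>
    firstGreater (PySem.List.slice nums2 (some ((lastOcc nums2).getD num 0 + 1)) none) num)

-- ===== PRECONDITION & SPEC =====
-- A raises KeyError when an element of nums1 does not occur in nums2; Pre_ excludes exactly those inputs.
def Pre_NextGreaterElem (nums1 : List Int) (nums2 : List Int) : Prop :=
  ∀ v ∈ nums1, v ∈ nums2

instance (nums1 : List Int) (nums2 : List Int) : Decidable (Pre_NextGreaterElem nums1 nums2) := by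
  unfold Pre_NextGreaterElem; infer_instance

def pvWitness_NextGreaterElem : List Int × List Int := ([4, 1, 2], [1, 3, 4, 2])

def Spec_NextGreaterElem (nums1 : List Int) (nums2 : List Int) (out : List Int) : Prop := out = NextGreaterElem_alt nums1 nums2
instance (nums1 : List Int) (nums2 : List Int) (out : List Int) : Decidable (Spec_NextGreaterElem nums1 nums2 out) := by unfold Spec_NextGreaterElem; infer_instance

-- ===== CLAIM (what is proved, stated in full; the proofs are below) =====
def Claim_equal_NextGreaterElem : Prop := ∀ (nums1 : List Int) (nums2 : List Int), Dom_NextGreaterElem nums1 nums2 → Pre_NextGreaterElem nums1 nums2 → Spec_NextGreaterElem nums1 nums2 (NextGreaterElem nums1 nums2)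


-- ===== LEMMAS AND PROOFS =====

-- proof-side helper: suffix of xs strictly after the last occurrence of v
def afterLast (xs : List Int) (v : Int) : List Int :=
  xs.foldl (fun out x => if x = v then [] else out ++ [x]) []

theorem afterLast_concat (xs : List Int) (x v : Int) :
    afterLast (xs ++ [x]) v = if x = v then [] else afterLast xs v ++ [x] := by
  simp [afterLast, List.foldl_append]

theorem enumerate_concat (xs : List Int) (x : Int) (s : Int) :
    PySem.List.enumerate (xs ++ [x]) s = PySem.List.enumerate xs s ++ [(s + xs.length, x)] := by
  induction xs generalizing s with
  | nil => simp [PySem.List.enumerate_cons, PySem.List.enumerate_nil]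
  | cons y t ih =>
      simp only [List.cons_append, PySem.List.enumerate_cons, ih, List.length_cons]
      congr 2
      push_cast
      ring

theorem lastOcc_concat (xs : List Int) (x : Int) :
    lastOcc (xs ++ [x]) = (lastOcc xs).insert x (xs.length : Int) := by
  simp [lastOcc, enumerate_concat, List.foldl_append]

theorem lastOcc_spec (xs : List Int) (v : Int) (hv : v ∈ xs) :
    ∃ j : Nat, (lastOcc xs).get? v = some (j : Int) ∧ j < xs.length ∧
      xs.drop (j + 1) = afterLast xs v := by
  induction xs using List.reverseRecOn with
  | nil => simp at hv
  | append_singleton xs x ih =>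
      rw [lastOcc_concat]
      by_cases hvx : v = x
      · subst hvx
        refine ⟨xs.length, ?_, by simp, ?_⟩
        · simp [PySem.Dict.get?_insert_self]
        · rw [afterLast_concat, if_pos rfl, List.drop_eq_nil_of_le (by simp)]
      · have hvxs : v ∈ xs := by
          rcases List.mem_append.mp hv with h | h
          · exact h
          · simp at h; exact absurd h hvx
        obtain ⟨j, hj, hjlt, hjd⟩ := ih hvxs
        refine ⟨j, ?_, by simp; omega, ?_⟩
        · rw [PySem.Dict.get?_insert]
          simp [hvx, hj]
        · rw [List.drop_append_of_le_length (by omega), hjd,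
              afterLast_concat, if_neg (fun h => hvx h.symm)]

-- first element of xs strictly greater than v, as an Option
def fg? (xs : List Int) (v : Int) : Option Int :=
  match xs with
  | [] => none
  | x :: rest => if v < x then some x else fg? rest v

theorem firstGreater_eq_fg? (xs : List Int) (v : Int) :
    firstGreater xs v = (fg? xs v).getD (-1) := by
  induction xs with
  | nil => rfl
  | cons x rest ih =>
      simp only [firstGreater, fg?]
      split_ifs with h
      · rfl
      · exact ih

theorem fg?_append (xs ys : List Int) (v : Int) :
    fg? (xs ++ ys) v = (fg? xs v).or (fg? ys v) := by
  induction xs with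
  | nil => rfl
  | cons x rest ih =>
      simp only [List.cons_append, fg?]
      split_ifs with h
      · rfl
      · exact ih

theorem popLoop_fst (stack : List Int) (d : PySem.Dict Int Int) (num : Int) :
    (popLoop stack d num).1 = stack.dropWhile (fun y => decide (y < num)) := by
  induction stack generalizing d with
  | nil => rfl
  | cons top rest ih =>
      simp only [popLoop, List.dropWhile]
      split_ifs with h
      · simpa [h] using ih (d.insert top num)
      · simp [h]

theorem popLoop_snd (stack : List Int) (d : PySem.Dict Int Int) (num : Int) :
    (popLoop stack d num).2 =
      (stack.takeWhile (fun y => decide (y < num))).foldl (fun d e => d.insert e num) d := by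
  induction stack generalizing d with
  | nil => rfl
  | cons top rest ih =>
      simp only [popLoop, List.takeWhile]
      split_ifs with h
      · simpa [h] using ih (d.insert top num)
      · simp [h]

theorem get?_foldl_insert_const (l : List Int) (d : PySem.Dict Int Int) (c v : Int) :
    ((l.foldl (fun d e => d.insert e c) d).get? v) =
      if v ∈ l then some c else d.get? v := by
  induction l generalizing d with
  | nil => simp
  | cons x rest ih =>
      simp only [List.foldl_cons, ih, List.mem_cons]
      by_cases hv : v ∈ rest
      · simp [hv]
      · by_cases hx : v = x
        · simp [hx, PySem.Dict.get?_insert_self]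
        · simp [hv, hx, PySem.Dict.get?_insert]

-- membership in dropWhile / takeWhile on a sorted (ascending, head = smallest) stack
theorem mem_dropWhile_sorted (s : List Int) (x v : Int) (hs : List.Pairwise (· ≤ ·) s) :
    (v ∈ s.dropWhile (fun y => decide (y < x))) ↔ (v ∈ s ∧ ¬ v < x) := by
  induction s with
  | nil => simp
  | cons a t ih =>
      have hs' : List.Pairwise (· ≤ ·) t := hs.of_cons
      simp only [List.dropWhile]
      by_cases h : a < x
      · simp only [h, decide_true]
        rw [ih hs']
        constructor
        · rintro ⟨hv, hlt⟩; exact ⟨List.mem_cons_of_mem _ hv, hlt⟩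
        · rintro ⟨hv, hlt⟩
          rcases List.mem_cons.mp hv with rfl | hv
          · exact absurd h hlt
          · exact ⟨hv, hlt⟩
      · simp only [h, decide_false]
        constructor
        · intro hv
          refine ⟨hv, ?_⟩
          rcases List.mem_cons.mp hv with rfl | hv
          · exact h
          · intro hlt
            have hav : a ≤ v := (List.pairwise_cons.mp hs).1 v hv
            exact h (lt_of_le_of_lt hav hlt)
        · exact fun h => h.1

theorem mem_takeWhile_imp' (s : List Int) (x v : Int)
    (h : v ∈ s.takeWhile (fun y => decide (y < x))) : v ∈ s ∧ v < x := by
  induction s with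
  | nil => simp at h
  | cons a t ih =>
      simp only [List.takeWhile] at h
      by_cases ha : a < x
      · simp only [ha, decide_true, List.mem_cons] at h
        rcases h with rfl | h
        · exact ⟨List.mem_cons_self, ha⟩
        · have := ih h; exact ⟨List.mem_cons_of_mem _ this.1, this.2⟩
      · simp [ha] at h

theorem mem_takeWhile_of_sorted (s : List Int) (x v : Int) (hs : List.Pairwise (· ≤ ·) s)
    (hv : v ∈ s) (hlt : v < x) : v ∈ s.takeWhile (fun y => decide (y < x)) := by
  induction s with
  | nil => simp at hv
  | cons a t ih =>
      have hs' : List.Pairwise (· ≤ ·) t := hs.of_cons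
      simp only [List.takeWhile]
      rcases List.mem_cons.mp hv with rfl | hv'
      · simp [hlt]
      · have hax : a < x := lt_of_le_of_lt ((List.pairwise_cons.mp hs).1 v hv') hlt
        simp only [hax, decide_true]
        exact List.mem_cons_of_mem _ (ih hs' hv')

-- the state after the main for-loop
def runA (nums2 : List Int) : List Int × PySem.Dict Int Int :=
  nums2.foldl pushStep ([], PySem.Dict.empty)

theorem runA_concat (xs : List Int) (x : Int) :
    runA (xs ++ [x]) =
      (x :: (runA xs).1.dropWhile (fun y => decide (y < x)),
       ((runA xs).1.takeWhile (fun y => decide (y < x))).foldl (fun d e => d.insert e x) (runA xs).2) := by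
  simp [runA, List.foldl_append, pushStep, popLoop_fst, popLoop_snd]

-- the joint invariant of A's loop
def InvA (xs : List Int) : Prop :=
  List.Pairwise (· ≤ ·) (runA xs).1 ∧
  (∀ v : Int, v ∈ (runA xs).1 ↔ (v ∈ xs ∧ fg? (afterLast xs v) v = none)) ∧
  (∀ v : Int, v ∈ xs → v ∉ (runA xs).1 → (runA xs).2.get? v = fg? (afterLast xs v) v)

theorem fg?_concat_none (l : List Int) (x v : Int) :
    fg? (l ++ [x]) v = none ↔ (fg? l v = none ∧ ¬ v < x) := by
  rw [fg?_append]
  cases h : fg? l v <;> simp [fg?, Option.or] <;> tauto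

theorem invA (xs : List Int) : InvA xs := by
  induction xs using List.reverseRecOn with
  | nil =>
      refine ⟨by simp [runA], by simp [runA], ?_⟩
      intro v hv; simp at hv
  | append_singleton xs x ih =>
      obtain ⟨hs, hm, hd⟩ := ih
      have hrc := runA_concat xs x
      refine ⟨?_, ?_, ?_⟩
      · -- sortedness
        rw [hrc]
        refine List.pairwise_cons.mpr ⟨?_, ?_⟩
        · intro y hy
          have := (mem_dropWhile_sorted _ x y hs).mp hy
          exact le_of_not_gt this.2
        · exact hs.sublist (List.dropWhile_sublist _)
      · -- stack membership
        intro v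
        rw [hrc]
        by_cases hvx : v = x
        · subst hvx
          simp [afterLast_concat, fg?]
        · simp only [List.mem_cons, hvx, false_or]
          rw [mem_dropWhile_sorted _ x v hs, hm v]
          rw [afterLast_concat]
          simp only [List.mem_append, List.mem_singleton, hvx, or_false]
          rw [if_neg (fun h => hvx h.symm), fg?_concat_none]
          tauto
      · -- dict contents
        intro v hv hvs
        rw [hrc] at hvs
        have hvx : v ≠ x := by
          intro h; subst h; exact hvs List.mem_cons_self
        have hvxs : v ∈ xs := by
          rcases List.mem_append.mp hv with h | h
          · exact h
          · simp at h; exact absurd h hvx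
        have hvdrop : v ∉ (runA xs).1.dropWhile (fun y => decide (y < x)) := by
          intro h; exact hvs (List.mem_cons_of_mem _ h)
        rw [hrc]; dsimp only
        rw [get?_foldl_insert_const]
        have hxv : ¬ x = v := fun h => hvx h.symm
        rw [afterLast_concat, if_neg hxv, fg?_append]
        by_cases hvS : v ∈ (runA xs).1
        · have hvlt : v < x := by
            by_contra hge
            exact hvdrop ((mem_dropWhile_sorted _ x v hs).mpr ⟨hvS, hge⟩)
          rw [if_pos (mem_takeWhile_of_sorted _ x v hs hvS hvlt)]
          have : fg? (afterLast xs v) v = none := ((hm v).mp hvS).2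
          simp [this, fg?, hvlt, Option.or]
        · have hvtake : v ∉ (runA xs).1.takeWhile (fun y => decide (y < x)) := by
            intro h; exact hvS (mem_takeWhile_imp' _ x v h).1
          rw [if_neg hvtake, hd v hvxs hvS]
          have hfg : fg? (afterLast xs v) v ≠ none := fun h => hvS ((hm v).mpr ⟨hvxs, h⟩)
          rcases Option.ne_none_iff_exists'.mp hfg with ⟨w, hw⟩
          simp [hw, Option.or]

-- main pointwise lemma
theorem key_lemma (nums2 : List Int) (v : Int) (hv : v ∈ nums2) :
    ((((runA nums2).1.foldl (fun d w => d.insert w (-1)) (runA nums2).2).get? v).getD 0)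
      = firstGreater (afterLast nums2 v) v := by
  obtain ⟨hsort, hmem, hdict⟩ := invA nums2
  rw [get?_foldl_insert_const, firstGreater_eq_fg?]
  by_cases hst : v ∈ (runA nums2).1
  · have := (hmem v).mp hst
    simp [hst, this.2]
  · have := hdict v hv hst
    rw [if_neg hst, this]
    have hfg : fg? (afterLast nums2 v) v ≠ none := by
      intro h
      exact hst ((hmem v).mpr ⟨hv, h⟩)
    rcases Option.ne_none_iff_exists'.mp hfg with ⟨w, hw⟩
    simp [hw]

-- ===== VERDICT (by name: the statement is the Claim_ definition above) =====
theorem NextGreaterElem_spec : Claim_equal_NextGreaterElem := by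
  intro nums1 nums2 _ hpre
  unfold Spec_NextGreaterElem NextGreaterElem NextGreaterElem_alt
  apply List.map_congr_left
  intro num hnum
  have hmem := hpre num hnum
  obtain ⟨j, hj, hjlt, hjd⟩ := lastOcc_spec nums2 num hmem
  have hgd : (lastOcc nums2).getD num 0 = (j : Int) := by
    rw [PySem.Dict.getD_eq_get?_getD, hj]; rfl
  rw [hgd]
  have hsl : PySem.List.slice nums2 (some ((j : Int) + 1)) none = nums2.drop (j + 1) := by
    have := PySem.List.slice_from_natCast nums2 (j + 1)
    push_cast at this ⊢
    exact this
  rw [hsl, hjd]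
  exact key_lemma nums2 num hmem
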